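-- pv_equiv track=rewrite | github.com/AlesyaRabushka/text-language-recognition | lab2.py | distance
-- ===== SOURCE A (Python) =====
-- def distance(first, second):
--     all_dist = 0
--     count = 0
--     for item in first:
--         if item in second:
--             count += 1
--             x = first.index(item)
--             y = second.index(item)
--             dist = abs(x-y)
--             all_dist += dist
--     return all_dist
-- ===== SOURCE B (Python) =====
-- def distance(first, second):
--     # Group-by aggregation: each distinct common value contributes
--     # (its multiplicity in first) * |first-occurrence gap| exactly once.
--     cnt = {}
--     for x in first:
--         cnt[x] = cnt.get(x, 0) + 1
--     pos_f = {}
--     for i, x in enumerate(first):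
--         if x not in pos_f:
--             pos_f[x] = i
--     pos_s = {}
--     for j, y in enumerate(second):
--         if y not in pos_s:
--             pos_s[y] = j
--     return sum(c * abs(pos_f[v] - pos_s[v]) for v, c in cnt.items() if v in pos_s)
-- ===== Notes on version B (the rewrite author's own statement) =====
-- stated objective: faster
-- what changed: Instead of A's per-occurrence loop that rescans both lists for membership and .index on every element, B does a group-by: it builds a multiplicity counter and first-occurrence position maps in single passes, then sums count(v)*|pos_f[v]-pos_s[v]| once per DISTINCT common value.
import Mathlib
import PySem

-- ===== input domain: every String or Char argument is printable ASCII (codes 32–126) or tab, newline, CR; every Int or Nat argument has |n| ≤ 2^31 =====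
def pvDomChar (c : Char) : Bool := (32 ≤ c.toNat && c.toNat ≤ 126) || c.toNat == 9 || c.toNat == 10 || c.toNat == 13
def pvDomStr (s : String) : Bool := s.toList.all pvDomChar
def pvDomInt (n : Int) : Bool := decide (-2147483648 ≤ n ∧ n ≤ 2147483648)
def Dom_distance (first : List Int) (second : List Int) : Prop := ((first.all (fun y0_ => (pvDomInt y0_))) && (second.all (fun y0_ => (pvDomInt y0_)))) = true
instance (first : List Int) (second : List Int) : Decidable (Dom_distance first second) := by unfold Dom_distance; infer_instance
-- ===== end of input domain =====

-- B replaces A's per-occurrence loop (membership scan plus two list.index scans per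
-- element) by a group-by aggregation: one counter pass and two first-occurrence-index
-- passes, then one term count(v)*|posF v - posS v| per DISTINCT common value.

-- ===== PORT A =====
-- one loop over first; state = (all_dist, count); count is dead for the return value but kept faithfully
def distance (first : List Int) (second : List Int) : Int :=
  (first.foldl (fun (st : Int × Int) item =>
    if second.contains item then
      let x : Int := ((PySem.List.index? first item).getD 0 : Nat)
      let y : Int := ((PySem.List.index? second item).getD 0 : Nat)
      (st.1 + |x - y|, st.2 + 1)
    else st) (0, 0)).1

-- ===== PORT B =====
-- first-occurrence index dict: for i, x in enumerate(xs): if x not in d: d[x] = i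
def firstIdx (xs : List Int) : PySem.Dict Int Int :=
  (PySem.List.enumerate xs 0).foldl
    (fun d p => if d.contains p.2 then d else d.insert p.2 p.1) PySem.Dict.empty

def distance_alt (first : List Int) (second : List Int) : Int :=
  let cnt := first.foldl (fun d x => d.insert x (d.getD x 0 + 1)) PySem.Dict.empty
  let posF := firstIdx first
  let posS := firstIdx second
  -- sum(c * abs(pos_f[v] - pos_s[v]) for v, c in cnt.items() if v in pos_s);
  -- pos_f[v] / pos_s[v] are getD _ 0: the keys are present (v comes from first and passed
  -- the 'v in pos_s' test), so the default is never used
  cnt.items.foldl (fun tot p =>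
    if posS.contains p.1 then tot + p.2 * |posF.getD p.1 0 - posS.getD p.1 0| else tot) 0

-- ===== PRECONDITION & SPEC =====
def Spec_distance (first : List Int) (second : List Int) (out : Int) : Prop := out = distance_alt first second
instance (first : List Int) (second : List Int) (out : Int) : Decidable (Spec_distance first second out) := by unfold Spec_distance; infer_instance

-- ===== CLAIM (what is proved, stated in full; the proofs are below) =====
def Claim_equal_distance : Prop := ∀ (first : List Int) (second : List Int), Dom_distance first second → Spec_distance first second (distance first second)

-- ===== LEMMAS AND PROOFS =====

-- the per-occurrence contribution both programs are summing, as a function of the value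
def contrib (first second : List Int) (v : Int) : Int :=
  if second.contains v then
    |(((PySem.List.index? first v).getD 0 : Nat) : Int) -
     (((PySem.List.index? second v).getD 0 : Nat) : Int)| else 0

-- the first-occurrence dict built from 'enumerate xs s' on top of d looks up v to
-- d's value if present, else to s + (first index of v in xs)
lemma firstIdx_fold_get? (xs : List Int) (s : Int) (d : PySem.Dict Int Int) (v : Int) :
    ((PySem.List.enumerate xs s).foldl
      (fun d p => if d.contains p.2 then d else d.insert p.2 p.1) d).get? v =
    ((d.get? v).orElse (fun _ => (PySem.List.index? xs v).map (fun k => s + (k : Int)))) := by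
  induction xs generalizing s d with
  | nil =>
    rw [PySem.List.enumerate_nil]
    cases hg : d.get? v <;> simp [hg, Option.orElse]
  | cons x xs ih =>
    rw [PySem.List.enumerate_cons, List.foldl_cons]
    by_cases hc : d.contains x = true
    · rw [if_pos hc, ih]
      cases hg : d.get? v with
      | some w => simp [Option.orElse]
      | none =>
        by_cases hx : x = v
        · subst hx
          have := (PySem.Dict.get?_eq_none_iff_contains d x).mp hg
          simp [this] at hc
        · rw [PySem.List.index?_cons_of_ne xs hx]
          cases hi : PySem.List.index? xs v <;>
            · simp [Option.orElse]
              try omega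
    · rw [if_neg hc, ih]
      have hgn : d.get? x = none :=
        (PySem.Dict.get?_eq_none_iff_contains d x).mpr (by simpa using hc)
      by_cases hx : x = v
      · subst hx
        rw [PySem.List.index?_cons_self, PySem.Dict.get?_insert_self, hgn]
        simp [Option.orElse]
      · rw [PySem.Dict.get?_insert_of_ne d s (fun h => hx h.symm),
            PySem.List.index?_cons_of_ne xs hx]
        cases hg : d.get? v with
        | some w => simp [Option.orElse]
        | none =>
          cases hi : PySem.List.index? xs v <;>
            · simp [Option.orElse]
              try omega

lemma firstIdx_get? (xs : List Int) (v : Int) :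
    (firstIdx xs).get? v = (PySem.List.index? xs v).map (fun k => (k : Int)) := by
  rw [firstIdx, firstIdx_fold_get?, PySem.Dict.get?_empty]
  cases hi : PySem.List.index? xs v <;> simp [Option.orElse]

-- A's fold equals the sum of per-occurrence contributions over first
lemma A_eq_sum (first second : List Int) :
    distance first second = (first.map (contrib first second)).sum := by
  unfold distance
  have hfun : (fun (st : Int × Int) item =>
      if second.contains item then
        let x : Int := ((PySem.List.index? first item).getD 0 : Nat)
        let y : Int := ((PySem.List.index? second item).getD 0 : Nat)
        (st.1 + |x - y|, st.2 + 1)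
      else st) =
      (fun (st : Int × Int) item =>
        ((fun a i => a + contrib first second i) st.1 item,
         (fun (c : Int) i => if second.contains i then c + 1 else c) st.2 item)) := by
    funext st item
    simp only [contrib]
    split_ifs with h <;> simp
  rw [hfun, PySem.List.foldl_prod_mk
        (f := fun a i => a + contrib first second i)
        (g := fun (c : Int) i => if second.contains i then c + 1 else c),
      PySem.List.foldl_add]
  simp

-- count of v in the one-element list [x]
lemma count_single_ne (v x : Int) (h : v ≠ x) : List.count v [x] = 0 := by
  rw [List.count_singleton, if_neg]
  simp [Ne.symm h]

-- Σ_{v ∈ s} (if v = x then c else 0) = 0 when x ∉ s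
lemma sum_ite_zero (s : List Int) (x : Int) (hx : x ∉ s) (c : Int) :
    (s.map (fun v => if v = x then c else 0)).sum = 0 := by
  apply List.sum_eq_zero
  intro a ha
  rcases List.mem_map.mp ha with ⟨v, hv, rfl⟩
  have hne : v ≠ x := fun h => hx (h ▸ hv)
  simp [hne]

-- Σ_{v ∈ s} (if v = x then c else 0) = c for Nodup s with x ∈ s
lemma sum_ite_single (s : List Int) (x c : Int) :
    s.Nodup → x ∈ s → (s.map (fun v => if v = x then c else 0)).sum = c := by
  induction s with
  | nil => intro _ hx; cases hx
  | cons y t ih =>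
    intro hn hx
    rcases List.mem_cons.mp hx with rfl | hx'
    · have hxt : x ∉ t := (List.nodup_cons.mp hn).1
      simp [sum_ite_zero t x hxt c]
    · have hyx : y ≠ x := fun h => (List.nodup_cons.mp hn).1 (h ▸ hx')
      simp only [List.map_cons, List.sum_cons, if_neg hyx,
        ih (List.nodup_cons.mp hn).2 hx']
      ring

-- GROUP-BY: summing f over every occurrence equals summing multiplicity * f over
-- the distinct values (in first-occurrence order)
lemma sum_groupby (l : List Int) (f : Int → Int) :
    (l.map f).sum =
    ((PySem.Set.ofList l).map (fun v => ((List.count v l : Nat) : Int) * f v)).sum := by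
  induction l using List.reverseRecOn with
  | nil => simp [PySem.Set.ofList_nil]
  | append_singleton l x ih =>
    rw [List.map_append, List.sum_append, ih, PySem.Set.ofList_append_singleton]
    by_cases hx : x ∈ l
    · have hxs : x ∈ PySem.Set.ofList l := (PySem.Set.mem_ofList l x).mpr hx
      rw [PySem.Set.add_of_mem hxs]
      have hsplit : ∀ v ∈ PySem.Set.ofList l,
          ((List.count v (l ++ [x]) : Nat) : Int) * f v =
          ((List.count v l : Nat) : Int) * f v + (if v = x then f x else 0) := by
        intro v _
        rw [List.count_append]
        by_cases hv : v = x
        · subst hv; simp; ring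
        · rw [count_single_ne v x hv, if_neg hv]; ring
      rw [List.map_congr_left hsplit, PySem.List.sum_map_add_int,
          sum_ite_single _ x (f x) (PySem.Set.nodup_ofList l) hxs]
      simp
    · have hxs : x ∉ PySem.Set.ofList l := fun h => hx ((PySem.Set.mem_ofList l x).mp h)
      rw [PySem.Set.add_of_not_mem hxs, List.map_append, List.sum_append]
      congr 1
      · refine congrArg List.sum (List.map_congr_left ?_)
        intro v hv
        have hvx : v ≠ x := fun h => hx (h ▸ (PySem.Set.mem_ofList l v).mp hv)
        rw [List.count_append, count_single_ne v x hvx]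
        simp
      · simp [List.count_append, List.count_eq_zero_of_not_mem hx]

-- ===== VERDICT (by name: the statement is the Claim_ definition above) =====
theorem distance_spec : Claim_equal_distance := by
  intro first second _
  show distance first second = distance_alt first second
  rw [A_eq_sum, sum_groupby first (contrib first second)]
  simp only [distance_alt, PySem.Dict.foldl_insert_getD_add_one_eq_counter,
    PySem.Dict.items_counter]
  -- turn B's guarded fold into a sum of per-distinct-value terms
  have hfun : (fun (tot : Int) (p : Int × Int) =>
      if (firstIdx second).contains p.1 then
        tot + p.2 * |(firstIdx first).getD p.1 0 - (firstIdx second).getD p.1 0| else tot) =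
      (fun (tot : Int) p => tot + (fun (q : Int × Int) =>
        if (firstIdx second).contains q.1 then
          q.2 * |(firstIdx first).getD q.1 0 - (firstIdx second).getD q.1 0| else 0) p) := by
    funext tot p
    split_ifs with h <;> simp [h]
  rw [hfun, PySem.List.foldl_add
        (g := fun (q : Int × Int) =>
          if (firstIdx second).contains q.1 then
            q.2 * |(firstIdx first).getD q.1 0 - (firstIdx second).getD q.1 0| else 0),
      List.map_map]
  simp only [Int.zero_add]
  apply congrArg
  apply List.map_congr_left
  intro v hv
  have hvf : v ∈ first := (PySem.Set.mem_ofList first v).mp hv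
  rcases hF : PySem.List.index? first v with _ | kF
  · exact absurd hvf ((PySem.List.index?_eq_none_iff first v).mp hF)
  have hFd : (firstIdx first).getD v 0 = (kF : Int) := by
    rw [PySem.Dict.getD_eq_get?_getD, firstIdx_get?, hF]; rfl
  have hcontains : (firstIdx second).contains v = second.contains v := by
    rw [PySem.Dict.contains_eq_isSome_get?, firstIdx_get?]
    rcases hS : PySem.List.index? second v with _ | kS
    · have := (PySem.List.index?_eq_none_iff second v).mp hS
      simp [this]
    · have : v ∈ second := (PySem.List.index?_isSome_iff second v).mp (by rw [hS]; rfl)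
      simp [this]
  simp only [Function.comp, contrib, hcontains]
  by_cases hs : second.contains v = true
  · have hs' : v ∈ second := by simpa using hs
    rcases hS : PySem.List.index? second v with _ | kS
    · have hns : v ∉ second := (PySem.List.index?_eq_none_iff second v).mp hS
      exact absurd hs' hns
    · have hSd : (firstIdx second).getD v 0 = (kS : Int) := by
        rw [PySem.Dict.getD_eq_get?_getD, firstIdx_get?, hS]; rfl
      rw [PySem.List.index?_eq_idxOf?] at hF hS
      simp [hs', hF, hFd, hSd]
  · have hs' : v ∉ second := by simpa using hs
    simp [hs']
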